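-- pv_equiv track=rewrite | github.com/anikolaienko/algorithms-py | algorithms/sum_min_sums.py | findTotalPower
-- ===== SOURCE A (Python) =====
-- MODULO_COEF = 10 ** 9 + 7
--
-- def findTotalPower(power):
--     min_value = power[0]
--     sum_values = [power[0]]
--     total_sum = min_value * sum_values[-1]
--
--     for i in range(1, len(power)):
--         min_value = min(min_value, power[i])
--         curr_sum = power[i] * power[i] + sum(sum_values) * min_value
--         sum_values.append(sum(sum_values) + power[i])
--
--         total_sum = (total_sum + curr_sum) % MODULO_COEF
--
--     return total_sum
-- ===== SOURCE B (Python) =====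
-- MODULO_COEF = 10 ** 9 + 7
--
-- def findTotalPower(power):
--     # O(n): keep the running total of sum_values instead of re-summing the list
--     min_value = power[0]
--     running_sum = power[0]          # invariant: running_sum == sum(sum_values)
--     total_sum = power[0] * power[0]
--     for p in power[1:]:
--         if p < min_value:
--             min_value = p
--         total_sum = (total_sum + p * p + running_sum * min_value) % MODULO_COEF
--         running_sum = running_sum + (running_sum + p)
--     return total_sum
-- ===== Notes on version B (the rewrite author's own statement) =====
-- stated objective: faster
-- what changed: B replaces the growing sum_values list that A re-sums with sum() on every iteration by a single running scalar running_sum (== sum(sum_values)), turning the quadratic loop into one linear pass over the tail of the list.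
import Mathlib
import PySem

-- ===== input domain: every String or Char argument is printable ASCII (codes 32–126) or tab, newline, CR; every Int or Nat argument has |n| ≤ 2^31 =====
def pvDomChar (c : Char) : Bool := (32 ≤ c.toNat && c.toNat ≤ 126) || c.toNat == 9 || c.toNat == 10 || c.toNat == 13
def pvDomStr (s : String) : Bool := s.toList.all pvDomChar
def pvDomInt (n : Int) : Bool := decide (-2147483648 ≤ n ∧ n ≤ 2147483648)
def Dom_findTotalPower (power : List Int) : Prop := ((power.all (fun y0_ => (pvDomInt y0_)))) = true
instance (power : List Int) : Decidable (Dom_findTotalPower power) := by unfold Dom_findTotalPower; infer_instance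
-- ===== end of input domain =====

-- B keeps a running scalar sum of A's sum_values list instead of re-summing
-- the list each iteration (one linear pass; A's loop is quadratic).

-- ===== PORT A =====
-- the body of A's for-loop; state = (min_value, sum_values, total_sum)
def fTPStepA (st : Int × List Int × Int) (p : Int) : Int × List Int × Int :=
  let mv := min st.1 p
  let curr := p * p + st.2.1.sum * mv
  let sv := st.2.1 ++ [st.2.1.sum + p]
  (mv, sv, PySem.Int.mod (st.2.2 + curr) (10 ^ 9 + 7))

def findTotalPower (power : List Int) : Int :=
  match power with
  | [] => 0      -- power[0] raises IndexError; excluded by Pre_findTotalPower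
  | p0 :: _ =>
    -- initial total_sum = min_value * sum_values[-1] = p0 * p0 (sum_values = [p0])
    let st := (PySem.List.pyRange 1 (power.length : Int) 1).foldl
      (fun st i => fTPStepA st (PySem.List.pyGetD power i 0)) (p0, [p0], p0 * p0)
    st.2.2

-- ===== PORT B =====
-- loop body of Source B; state = (min_value, running_sum, total_sum)
def fTPStepB (st : Int × Int × Int) (p : Int) : Int × Int × Int :=
  let mv := if p < st.1 then p else st.1
  let ts := PySem.Int.mod (st.2.2 + (p * p + st.2.1 * mv)) (10 ^ 9 + 7)
  (mv, st.2.1 + (st.2.1 + p), ts)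

def findTotalPower_alt (power : List Int) : Int :=
  match power with
  | [] => 0      -- power[0] raises IndexError; excluded by Pre_findTotalPower
  | p0 :: rest =>
    (rest.foldl fTPStepB (p0, p0, p0 * p0)).2.2

-- ===== PRECONDITION & SPEC =====
-- A evaluates power[0], so it raises IndexError exactly on the empty list.
def Pre_findTotalPower (power : List Int) : Prop := power ≠ []
instance (power : List Int) : Decidable (Pre_findTotalPower power) := by unfold Pre_findTotalPower; infer_instance
def pvWitness_findTotalPower : List Int := [3, -1, 2]

def Spec_findTotalPower (power : List Int) (out : Int) : Prop := out = findTotalPower_alt power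
instance (power : List Int) (out : Int) : Decidable (Spec_findTotalPower power out) := by unfold Spec_findTotalPower; infer_instance

-- ===== CLAIM (what is proved, stated in full; the proofs are below) =====
def Claim_equal_findTotalPower : Prop := ∀ (power : List Int), Dom_findTotalPower power → Pre_findTotalPower power → Spec_findTotalPower power (findTotalPower power)

-- ===== LEMMAS AND PROOFS =====

-- invariant: B's state is (min_value, sum of A's sum_values, total_sum)
theorem fTP_fold_eq (rest : List Int) : ∀ (mv : Int) (sv : List Int) (ts : Int),
    (rest.foldl fTPStepA (mv, sv, ts)).2.2 = (rest.foldl fTPStepB (mv, sv.sum, ts)).2.2 := by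
  induction rest with
  | nil => intro mv sv ts; rfl
  | cons p t ih =>
    intro mv sv ts
    simp only [List.foldl_cons, fTPStepA, fTPStepB]
    rw [ih]
    have hmin : min mv p = if p < mv then p else mv := by
      rcases le_or_gt mv p with h | h
      · rw [min_eq_left h, if_neg (not_lt.mpr h)]
      · rw [min_eq_right h.le, if_pos h]
    have hsum : (sv ++ [sv.sum + p]).sum = sv.sum + (sv.sum + p) := by
      simp
    rw [hmin, hsum]

-- ===== VERDICT (by name: the statement is the Claim_ definition above) =====
theorem findTotalPower_spec : Claim_equal_findTotalPower := by
  intro power _ hpre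
  unfold Spec_findTotalPower findTotalPower findTotalPower_alt
  match power with
  | [] => exact absurd rfl hpre
  | p0 :: rest =>
    simp only
    rw [show ((p0 :: rest).length : Int) = PySem.List.len (p0 :: rest) from by
          simp [PySem.List.len_eq],
        PySem.List.foldl_pyRange_pyGetD (p0 :: rest) 0 fTPStepA (p0, [p0], p0 * p0) (by norm_num)]
    simpa using fTP_fold_eq rest p0 [p0] (p0 * p0)
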